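-- pv_equiv track=rewrite | github.com/FloLrx/BraidWordProblem | TIPEProblemeDuMot.py | reduire
-- ===== SOURCE A (Python) =====
-- def reduire_help(L):# supprime la première occurrence d'un générétateur et de son inverse à la suite
--     for i in range(len(L)-1):
--         for j in range(1,5):
--             if (L[i]==j and L[i+1]==-j) or (L[i]==-j and L[i+1]==j):
--                 L[i]=0
--                 L[i+1]=0
--     k=L.count(0)
--     for i in range(k):
--         L.remove(0)
--     return L
--
-- def reduire(L):# supprime toutes les occurrences d'un générétateur et de son inverse à la suite, ie réduit les mots dans le groupe libre
--     k=0
--     n=len(L)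
--     M=[]
--     while k<n/2:
--         M=reduire_help(L)
--         k=k+1
--         L=M
--     return L
-- ===== SOURCE B (Python) =====
-- def reduire(L):
--     # Single stack pass: push each letter, pop when it cancels the top
--     # (generators 1..4 and their inverses; zeros are dropped).
--     # Note: unlike A, this does not mutate the caller's list; the equivalence
--     # claimed is about the return value only.
--     stack = []
--     for x in L:
--         if x == 0:
--             continue
--         if stack and stack[-1] == -x and 1 <= abs(x) <= 4:
--             stack.pop()
--         else:
--             stack.append(x)
--     return stack
-- ===== Notes on version B (the rewrite author's own statement) =====
-- stated objective: faster
-- what changed: Replaces A's quadratic-pass scheme (n/2 sweeps, each sweep zeroing adjacent inverse pairs in place and then repeatedly calling list.remove) by a single left-to-right stack pass that pops when the current letter cancels the stack top; A also mutates its argument in place while B does not (return values agree).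
import Mathlib
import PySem

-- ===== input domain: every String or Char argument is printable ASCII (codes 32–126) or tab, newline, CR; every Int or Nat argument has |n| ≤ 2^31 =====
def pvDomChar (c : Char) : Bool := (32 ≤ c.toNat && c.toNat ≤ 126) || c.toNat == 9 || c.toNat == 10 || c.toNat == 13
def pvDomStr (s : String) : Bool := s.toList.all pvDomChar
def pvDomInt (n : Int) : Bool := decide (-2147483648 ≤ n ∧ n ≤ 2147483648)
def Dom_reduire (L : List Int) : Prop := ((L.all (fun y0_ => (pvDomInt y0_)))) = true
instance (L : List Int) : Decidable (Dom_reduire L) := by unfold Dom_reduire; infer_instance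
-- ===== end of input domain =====

-- B replaces A's O(n^3) repeated-sweep cancellation by one O(n) stack pass; A also
-- mutates its argument in place (B does not): the equivalence is about the return value.

-- ===== PORT A =====
-- inner 'for j in range(1,5)' of reduire_help; indices i, i+1 come from
-- 'range(len(L)-1)' so they are in range and the total pyGetD/pySetD forms are exact
def helpInner (M : List Int) (i : Int) : List Int :=
  (PySem.List.pyRange 1 5 1).foldl (fun M j =>
    if (PySem.List.pyGetD M i 0 = j ∧ PySem.List.pyGetD M (i+1) 0 = -j) ∨
       (PySem.List.pyGetD M i 0 = -j ∧ PySem.List.pyGetD M (i+1) 0 = j) then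
      PySem.List.pySetD (PySem.List.pySetD M i 0) (i+1) 0
    else M) M

def reduire_help (L : List Int) : List Int :=
  let M := (PySem.List.pyRange 0 ((L.length : Int) - 1) 1).foldl helpInner L
  let k := PySem.List.count M (0 : Int)
  -- 'for i in range(k): L.remove(0)': k = count guarantees remove? finds a 0,
  -- so the 'none' fallback (Python: ValueError) is never taken
  (PySem.List.pyRange 0 (k : Int) 1).foldl
    (fun S _ => match PySem.List.remove? S (0 : Int) with
      | some S' => S'
      | none => S) M

-- 'while k < n/2' on ints k, n with |n| ≤ 2^31: n/2 is an exact binary float,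
-- so the float comparison k < n/2 is exactly the integer test 2*k < n
def reduireLoop (n k : Int) (L : List Int) : List Int :=
  if 2 * k < n then reduireLoop n (k + 1) (reduire_help L) else L
termination_by (n - 2 * k).toNat
decreasing_by omega

def reduire (L : List Int) : List Int := reduireLoop (L.length : Int) 0 L

-- ===== PORT B =====
-- 'stack[-1]' guarded by 'stack and …' → pyGetD stack (-1) 0 on a nonempty stack (exact);
-- 'stack.pop()' with the value discarded → dropLast
def altStep (stack : List Int) (x : Int) : List Int :=
  if x = 0 then stack
  else if stack ≠ [] ∧ PySem.List.pyGetD stack (-1) 0 = -x ∧ 1 ≤ |x| ∧ |x| ≤ 4 then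
    stack.dropLast
  else stack ++ [x]

def reduire_alt (L : List Int) : List Int := L.foldl altStep []

-- ===== PRECONDITION & SPEC =====
def Spec_reduire (L : List Int) (out : List Int) : Prop := out = reduire_alt L
instance (L : List Int) (out : List Int) : Decidable (Spec_reduire L out) := by unfold Spec_reduire; infer_instance

-- ===== CLAIM (what is proved, stated in full; the proofs are below) =====
def Claim_equal_reduire : Prop := ∀ (L : List Int), Dom_reduire L → Spec_reduire L (reduire L)

-- ===== LEMMAS AND PROOFS =====

-- letters of the free group: a cancellable generator ±g (1 ≤ g ≤ 4) becomes (g, sign);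
-- every other integer is inert and becomes (v, true)
def ffg (v : Int) : Int × Bool :=
  if 1 ≤ v.natAbs ∧ v.natAbs ≤ 4 then ((v.natAbs : Int), decide (0 < v)) else (v, true)

-- the free-group word of a state: drop zeros, embed the rest
def phi (L : List Int) : List (Int × Bool) := (L.filter (fun x => x ≠ 0)).map ffg

-- "a cancels with a following b"
def NC (a b : Int) : Prop := a = -b ∧ 1 ≤ b.natAbs ∧ b.natAbs ≤ 4

-- normal form: no zeros, no adjacent cancelling pair
def NF (L : List Int) : Prop := (0:Int) ∉ L ∧ List.IsChain (fun a b => ¬ NC a b) L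

-- invariant of the zeroing sweep, relative to the state B it started from
def SInv (B M : List Int) : Prop :=
  M.length = B.length ∧ FreeGroup.Red (phi B) (phi M) ∧
  B.count 0 ≤ M.count 0 ∧ (M = B ∨ B.count 0 + 2 ≤ M.count 0)

theorem ffg_inj (a b : Int) (h : ffg a = ffg b) : a = b := by
  unfold ffg at h
  split_ifs at h with h1 h2 h2 <;>
    simp only [Prod.mk.injEq, decide_eq_decide] at h <;> omega

theorem NC_ffg (a b : Int) (h : NC a b) : ffg b = ((ffg a).1, !(ffg a).2) := by
  obtain ⟨rfl, h1, h4⟩ := h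
  unfold ffg
  rw [if_pos (by omega), if_pos (by omega)]
  simp only [Int.natAbs_neg, Prod.mk.injEq, true_and]
  rcases lt_trichotomy b 0 with hb | hb | hb <;> simp [hb] <;> omega

theorem ffg_chain_of_not_NC (a b : Int) (h : ¬ NC a b) :
    (ffg a).1 = (ffg b).1 → (ffg a).2 = (ffg b).2 := by
  intro h1
  by_contra h2
  unfold ffg at h1 h2
  unfold NC at h
  split_ifs at h1 h2 with hA hB hB
  · simp only [decide_eq_decide] at h2
    rw [Int.natCast_inj] at h1
    omega
  · simp only [] at h1; omega
  · simp only [] at h1; omega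
  · exact h2 rfl

theorem phi_append (l₁ l₂ : List Int) : phi (l₁ ++ l₂) = phi l₁ ++ phi l₂ := by
  simp [phi]

theorem phi_cons_ne (x : Int) (l : List Int) (hx : x ≠ 0) :
    phi (x :: l) = ffg x :: phi l := by
  simp [phi, hx]

theorem phi_cons_zero (l : List Int) : phi ((0:Int) :: l) = phi l := by
  simp [phi]

theorem phi_zero_free (L : List Int) (h : (0:Int) ∉ L) : phi L = L.map ffg := by
  unfold phi
  rw [List.filter_eq_self.2]
  intro a ha
  simp only [ne_eq, decide_eq_true_eq]
  rintro rfl; exact h ha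

-- normal forms map to FreeGroup-reduced words
theorem NF_isReduced (L : List Int) (h : NF L) : FreeGroup.IsReduced (L.map ffg) := by
  unfold FreeGroup.IsReduced
  rw [List.isChain_map]
  exact h.2.imp_of_mem_imp (fun a b _ _ hab => ffg_chain_of_not_NC a b hab)

-- zeroing an adjacent cancelling pair is one FreeGroup reduction step on phi
theorem red_step_zero_pair (M : List Int) (i : ℕ) (h : i + 1 < M.length)
    (hnc : NC M[i] M[i+1]) :
    FreeGroup.Red.Step (phi M) (phi ((M.set i 0).set (i+1) 0)) := by
  have hi : i < M.length := by omega
  have hM : M = M.take i ++ M[i] :: M[i+1] :: M.drop (i+2) := by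
    conv_lhs => rw [← List.take_append_drop i M]
    rw [List.drop_eq_getElem_cons hi, List.drop_eq_getElem_cons h]
  have hlt : (M.take i).length = i := by simp [List.length_take]; omega
  have hS : (M.set i 0).set (i+1) 0 = M.take i ++ (0:Int) :: 0 :: M.drop (i+2) := by
    conv_lhs => rw [hM]
    rw [List.set_append, hlt, if_neg (by omega), Nat.sub_self,
      show (M[i] :: M[i+1] :: M.drop (i+2)).set 0 (0:Int) = 0 :: M[i+1] :: M.drop (i+2) from rfl,
      List.set_append, hlt, if_neg (by omega), show i + 1 - i = 1 by omega]
    rfl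
  have ha : M[i] ≠ 0 := by
    have := hnc.1; have := hnc.2.1; omega
  have hb : M[i+1] ≠ 0 := by
    have := hnc.2.1; omega
  rw [hS]
  conv_lhs => rw [hM]
  rw [phi_append, phi_cons_ne _ _ ha, phi_cons_ne _ _ hb,
    phi_append, phi_cons_zero, phi_cons_zero, NC_ffg _ _ hnc]
  exact FreeGroup.Red.Step.not

-- count of 0 grows by 1 when a nonzero entry is zeroed
theorem count_set_zero (M : List Int) (n : ℕ) (h : n < M.length) (hz : M[n] ≠ 0) :
    (M.set n 0).count 0 = M.count 0 + 1 := by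
  have hM : M = M.take n ++ M[n] :: M.drop (n+1) := by
    conv_lhs => rw [← List.take_append_drop n M]
    rw [List.drop_eq_getElem_cons h]
  have hc : M.count 0 = (M.take n).count 0 + (M[n] :: M.drop (n+1)).count 0 := by
    conv_lhs => rw [hM]
    rw [List.count_append]
  rw [List.set_eq_take_cons_drop 0 h, hc]
  rw [List.count_append, List.count_cons, List.count_cons]
  simp [hz]
  omega

theorem SInv_refl (B : List Int) : SInv B B :=
  ⟨rfl, Relation.ReflTransGen.refl, le_refl _, Or.inl rfl⟩

-- one j-step of the inner loop preserves the invariant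
theorem innerStep_inv (B M : List Int) (i j : Int) (hi : 0 ≤ i)
    (hi2 : i + 1 < (B.length : Int)) (hj1 : 1 ≤ j) (hj4 : j ≤ 4) (hInv : SInv B M) :
    SInv B (if (PySem.List.pyGetD M i 0 = j ∧ PySem.List.pyGetD M (i+1) 0 = -j) ∨
       (PySem.List.pyGetD M i 0 = -j ∧ PySem.List.pyGetD M (i+1) 0 = j) then
      PySem.List.pySetD (PySem.List.pySetD M i 0) (i+1) 0
    else M) := by
  obtain ⟨hlen, hred, hcnt, hdich⟩ := hInv
  split_ifs with hc
  · have hr2 : i.toNat + 1 < M.length := by omega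
    have hr1 : i.toNat < M.length := by omega
    have hg1 : PySem.List.pyGetD M i 0 = M[i.toNat] :=
      PySem.List.pyGetD_eq_getElem M 0 hi (by omega)
    have hg2 : PySem.List.pyGetD M (i+1) 0 = M[i.toNat + 1] := by
      have h21 := PySem.List.pyGetD_eq_getElem (i := i+1) M 0 (by omega) (by omega)
      simpa only [show (i + 1).toNat = i.toNat + 1 from by omega] using h21
    rw [hg1, hg2] at hc
    have hnc : NC M[i.toNat] M[i.toNat + 1] := by
      unfold NC
      rcases hc with ⟨h1, h2⟩ | ⟨h1, h2⟩ <;> rw [h1, h2] <;> constructor <;> omega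
    have hS : PySem.List.pySetD (PySem.List.pySetD M i 0) (i+1) 0 =
        (M.set i.toNat 0).set (i.toNat + 1) 0 := by
      rw [PySem.List.pySetD_of_nonneg M 0 hi,
        PySem.List.pySetD_of_nonneg (M.set i.toNat 0) 0 (by omega : (0:Int) ≤ i + 1)]
      rw [show (i+1).toNat = i.toNat + 1 by omega]
    rw [hS]
    have ha : M[i.toNat] ≠ 0 := by have := hnc.1; have := hnc.2.1; omega
    have hb : M[i.toNat + 1] ≠ 0 := by have := hnc.2.1; omega
    have hb' : (M.set i.toNat 0)[i.toNat + 1]'(by simpa using hr2) = M[i.toNat + 1] := by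
      rw [List.getElem_set_ne (by omega)]
    have hcount : ((M.set i.toNat 0).set (i.toNat + 1) 0).count 0 = M.count 0 + 2 := by
      rw [count_set_zero _ _ (by simpa using hr2) (by rw [hb']; exact hb),
        count_set_zero _ _ hr1 ha]
    refine ⟨by simpa using hlen, ?_, by omega, ?_⟩
    · exact Relation.ReflTransGen.tail hred (red_step_zero_pair M i.toNat hr2 hnc)
    · rcases hdich with rfl | hge
      · exact Or.inr (by omega)
      · exact Or.inr (by omega)
  · exact ⟨hlen, hred, hcnt, hdich⟩

theorem pyRange15 : PySem.List.pyRange 1 5 1 = [1, 2, 3, 4] := by decide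

-- one j-step of the inner loop, as a named function (defeq to the lambda in helpInner)
def istep (i : Int) (M : List Int) (j : Int) : List Int :=
  if (PySem.List.pyGetD M i 0 = j ∧ PySem.List.pyGetD M (i+1) 0 = -j) ∨
     (PySem.List.pyGetD M i 0 = -j ∧ PySem.List.pyGetD M (i+1) 0 = j) then
    PySem.List.pySetD (PySem.List.pySetD M i 0) (i+1) 0
  else M

theorem helpInner_eq_istep (M : List Int) (i : Int) :
    helpInner M i = (PySem.List.pyRange 1 5 1).foldl (istep i) M := rfl

theorem inner_fold_inv (B : List Int) (i : Int) (hi : 0 ≤ i)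
    (hi2 : i + 1 < (B.length : Int)) :
    ∀ (js : List Int), (∀ j ∈ js, 1 ≤ j ∧ j ≤ 4) → ∀ M, SInv B M →
      SInv B (js.foldl (istep i) M) := by
  intro js hjs
  induction js with
  | nil => exact fun M h => h
  | cons j t iht =>
    intro M h
    rw [List.foldl_cons]
    refine iht (fun p hp => hjs p (List.mem_cons_of_mem _ hp)) _ ?_
    unfold istep
    exact innerStep_inv B M i j hi hi2 (hjs j List.mem_cons_self).1
      (hjs j List.mem_cons_self).2 h

theorem helpInner_inv (B M : List Int) (i : Int) (hi : 0 ≤ i)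
    (hi2 : i + 1 < (B.length : Int)) (hInv : SInv B M) : SInv B (helpInner M i) := by
  rw [helpInner_eq_istep]
  refine inner_fold_inv B i hi hi2 _ ?_ M hInv
  intro j hj
  rw [PySem.List.mem_pyRange_one] at hj
  omega

-- the whole zeroing sweep preserves the invariant
theorem phase1_fold_inv (B : List Int) (is : List Int)
    (hb : ∀ i ∈ is, 0 ≤ i ∧ i + 1 < (B.length : Int)) (M : List Int) (hInv : SInv B M) :
    SInv B (is.foldl helpInner M) := by
  induction is generalizing M with
  | nil => exact hInv
  | cons i is ih =>
    exact ih (fun p hp => hb p (List.mem_cons_of_mem _ hp))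
      _ (helpInner_inv B M i (hb i List.mem_cons_self).1 (hb i List.mem_cons_self).2 hInv)

-- when the inner loop runs on a state with a cancelling pair at i₀, it fires and
-- creates exactly two new zeros (later j cannot un-zero them)
theorem inner_fire (L : List Int) (i₀ : ℕ) (hi : i₀ + 1 < L.length)
    (hnc : NC (L[i₀]'(Nat.lt_of_succ_lt hi)) (L[i₀+1]'hi)) :
    L.count 0 + 2 ≤ (helpInner L (i₀:Int)).count 0 := by
  obtain ⟨hab, h1, h4⟩ := hnc
  have hg1 : PySem.List.pyGetD L (i₀:Int) 0 = L[i₀]'(Nat.lt_of_succ_lt hi) := by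
    have h := PySem.List.pyGetD_eq_getElem (i := (i₀:Int)) L 0 (by omega) (by omega)
    simpa using h
  have hg2 : PySem.List.pyGetD L ((i₀:Int)+1) 0 = L[i₀+1]'hi := by
    have h := PySem.List.pyGetD_eq_getElem (i := (i₀:Int)+1) L 0 (by omega) (by omega)
    simpa [show ((i₀:Int)+1).toNat = i₀+1 from by omega] using h
  set b := L[i₀+1]'hi with hbdef
  set a := L[i₀]'(Nat.lt_of_succ_lt hi) with hadef
  set j₀ : Int := (b.natAbs : Int) with hj₀def
  rw [helpInner_eq_istep,
    PySem.List.pyRange_one_append 1 j₀ 5 (by omega) (by omega),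
    PySem.List.pyRange_one_cons (show j₀ < 5 from by omega),
    List.foldl_append, List.foldl_cons]
  have hnoop : ∀ js : List Int, (∀ j ∈ js, 1 ≤ j ∧ j ≠ j₀) →
      js.foldl (istep (i₀:Int)) L = L := by
    intro js hjs
    induction js with
    | nil => rfl
    | cons j t iht =>
      rw [List.foldl_cons]
      have hj1 := (hjs j List.mem_cons_self).1
      have hjj := (hjs j List.mem_cons_self).2
      have hcf : istep (i₀:Int) L j = L := by
        unfold istep
        rw [if_neg]
        rw [hg1, hg2]
        rintro (⟨hA, hB⟩ | ⟨hA, hB⟩) <;> omega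
      rw [hcf]
      exact iht (fun p hp => hjs p (List.mem_cons_of_mem _ hp))
  rw [hnoop (PySem.List.pyRange 1 j₀ 1) (by
    intro j hj
    rw [PySem.List.mem_pyRange_one] at hj
    exact ⟨hj.1, by omega⟩)]
  have hb0 : b ≠ 0 := by omega
  have ha0 : a ≠ 0 := by omega
  have hfire : istep (i₀:Int) L j₀ = (L.set i₀ 0).set (i₀+1) 0 := by
    unfold istep
    rw [if_pos ?_]
    · rw [PySem.List.pySetD_of_nonneg L 0 (by omega),
        PySem.List.pySetD_of_nonneg _ 0 (by omega : (0:Int) ≤ (i₀:Int)+1)]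
      rw [show ((i₀:Int)).toNat = i₀ from by omega,
        show ((i₀:Int)+1).toNat = i₀+1 from by omega]
    · rw [hg1, hg2]
      rcases lt_or_gt_of_ne hb0 with hbneg | hbpos
      · exact Or.inl ⟨by omega, by omega⟩
      · exact Or.inr ⟨by omega, by omega⟩
  rw [hfire]
  have hb' : ((L.set i₀ 0)[i₀+1]'(by simpa using hi)) = b := by
    rw [List.getElem_set_ne (by omega)]
  have hcount : ((L.set i₀ 0).set (i₀+1) 0).count 0 = L.count 0 + 2 := by
    rw [count_set_zero _ _ (by simpa using hi) (by rw [hb']; exact hb0),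
      count_set_zero _ _ (Nat.lt_of_succ_lt hi) ha0]
  have hlen' : ((L.set i₀ 0).set (i₀+1) 0).length = L.length := by simp
  have hrest := inner_fold_inv ((L.set i₀ 0).set (i₀+1) 0) (i₀:Int) (by omega)
    (by rw [hlen']; push_cast; omega) (PySem.List.pyRange (j₀+1) 5 1)
    (by intro j hj; rw [PySem.List.mem_pyRange_one] at hj; omega)
    _ (SInv_refl _)
  have := hrest.2.2.1
  omega

-- if L has an adjacent cancelling pair, the sweep creates at least two new zeros
theorem phase1_progress (L : List Int) (i₀ : ℕ)
    (hi : i₀ + 1 < L.length) (hnc : NC L[i₀] L[i₀+1]) :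
    L.count 0 + 2 ≤ ((PySem.List.pyRange 0 ((L.length : Int) - 1) 1).foldl helpInner L).count 0 := by
  rw [PySem.List.pyRange_one_append 0 (i₀:Int) ((L.length : Int) - 1) (by omega) (by omega),
    PySem.List.pyRange_one_cons (show (i₀:Int) < (L.length : Int) - 1 from by omega),
    List.foldl_append, List.foldl_cons]
  set S1 := (PySem.List.pyRange 0 (i₀:Int) 1).foldl helpInner L with hS1
  have hInv1 : SInv L S1 := by
    refine phase1_fold_inv L _ ?_ L (SInv_refl L)
    intro i hi'
    rw [PySem.List.mem_pyRange_one] at hi'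
    omega
  have hlen1 : S1.length = L.length := hInv1.1
  rcases hInv1.2.2.2 with hd | hd
  · -- no firing yet: the state is still L, and the step at i₀ fires
    rw [hd]
    have hfire := inner_fire L i₀ hi hnc
    have hInv2 : SInv (helpInner L (i₀:Int)) ((PySem.List.pyRange ((i₀:Int)+1) ((L.length : Int) - 1) 1).foldl helpInner (helpInner L (i₀:Int))) := by
      refine phase1_fold_inv _ _ ?_ _ (SInv_refl _)
      intro i hi'
      rw [PySem.List.mem_pyRange_one] at hi'
      have hlen2 : (helpInner L (i₀:Int)).length = L.length :=
        (helpInner_inv L L (i₀:Int) (by omega) (by push_cast; omega) (SInv_refl L)).1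
      rw [hlen2]
      omega
    have := hInv2.2.2.1
    omega
  · -- a pair already fired before i₀: counts only grow from here
    have hInv2 : SInv S1 (helpInner S1 (i₀:Int)) :=
      helpInner_inv S1 S1 (i₀:Int) (by omega) (by rw [hlen1]; push_cast; omega) (SInv_refl S1)
    have hlen2 : (helpInner S1 (i₀:Int)).length = S1.length := hInv2.1
    have hInv3 : SInv (helpInner S1 (i₀:Int)) ((PySem.List.pyRange ((i₀:Int)+1) ((L.length : Int) - 1) 1).foldl helpInner (helpInner S1 (i₀:Int))) := by
      refine phase1_fold_inv _ _ ?_ _ (SInv_refl _)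
      intro i hi'
      rw [PySem.List.mem_pyRange_one] at hi'
      rw [hlen2, hlen1]
      omega
    have h2 := hInv2.2.2.1
    have h3 := hInv3.2.2.1
    omega

-- when no adjacent pair cancels, no zeroing condition ever fires
theorem pv_cond_false (L : List Int)
    (hNC : ∀ (k : ℕ) (hk : k + 1 < L.length), ¬ NC (L[k]'(Nat.lt_of_succ_lt hk)) (L[k+1]'hk)) (i j : Int)
    (hi : 0 ≤ i) (hj1 : 1 ≤ j) (hj4 : j ≤ 4) :
    ¬((PySem.List.pyGetD L i 0 = j ∧ PySem.List.pyGetD L (i+1) 0 = -j) ∨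
      (PySem.List.pyGetD L i 0 = -j ∧ PySem.List.pyGetD L (i+1) 0 = j)) := by
  intro hc
  by_cases hr : i + 1 < (L.length : Int)
  · have hg1 : PySem.List.pyGetD L i 0 = L[i.toNat] :=
      PySem.List.pyGetD_eq_getElem L 0 hi (by omega)
    have hg2 : PySem.List.pyGetD L (i+1) 0 = L[i.toNat + 1] := by
      have h21 := PySem.List.pyGetD_eq_getElem (i := i+1) L 0 (by omega) (by omega)
      simpa only [show (i + 1).toNat = i.toNat + 1 from by omega] using h21
    rw [hg1, hg2] at hc
    refine hNC i.toNat (by omega) ?_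
    unfold NC
    rcases hc with ⟨h1, h2⟩ | ⟨h1, h2⟩ <;> rw [h1, h2] <;> constructor <;> omega
  · have hg2 : PySem.List.pyGetD L (i+1) 0 = 0 := by
      apply PySem.List.pyGetD_of_none
      rw [PySem.List.pyGet?_eq_none_iff]
      intro hin
      unfold PySem.Raise.InRange at hin
      omega
    rw [hg2] at hc
    rcases hc with ⟨h1, h2⟩ | ⟨h1, h2⟩ <;> omega

theorem helpInner_fix (L : List Int)
    (hNC : ∀ (k : ℕ) (hk : k + 1 < L.length), ¬ NC (L[k]'(Nat.lt_of_succ_lt hk)) (L[k+1]'hk)) (i : Int) (hi : 0 ≤ i) :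
    helpInner L i = L := by
  unfold helpInner
  rw [pyRange15]
  simp only [List.foldl]
  rw [if_neg (pv_cond_false L hNC i 1 hi (by norm_num) (by norm_num)),
    if_neg (pv_cond_false L hNC i 2 hi (by norm_num) (by norm_num)),
    if_neg (pv_cond_false L hNC i 3 hi (by norm_num) (by norm_num)),
    if_neg (pv_cond_false L hNC i 4 hi (by norm_num) (by norm_num))]

-- a normal form is a fixed point of the sweep
theorem phase1_fix (L : List Int) (h : NF L) (is : List Int) (hpos : ∀ i ∈ is, 0 ≤ i) :
    is.foldl helpInner L = L := by
  have hNC : ∀ (k : ℕ) (hk : k + 1 < L.length), ¬ NC (L[k]'(Nat.lt_of_succ_lt hk)) (L[k+1]'hk) := by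
    intro k hk
    exact (List.isChain_iff_getElem.1 h.2) k hk
  induction is with
  | nil => rfl
  | cons i t ih =>
    rw [List.foldl_cons, helpInner_fix L hNC i (hpos i List.mem_cons_self)]
    exact ih (fun p hp => hpos p (List.mem_cons_of_mem _ hp))

theorem foldl_const_iter (g : List Int → List Int) :
    ∀ (l : List Int) (s : List Int), l.foldl (fun S _ => g S) s = g^[l.length] s := by
  intro l
  induction l with
  | nil => intro s; rfl
  | cons x t ih =>
    intro s
    rw [List.foldl_cons, List.length_cons, Function.iterate_succ_apply]
    exact ih (g s)

theorem filter_erase_zero : ∀ M : List Int,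
    (M.erase 0).filter (fun x => x ≠ 0) = M.filter (fun x => x ≠ 0) := by
  intro M
  induction M with
  | nil => rfl
  | cons x t ih =>
    by_cases hx : x = 0
    · subst hx
      rw [List.erase_cons_head]
      simp
    · rw [List.erase_cons_tail (by simpa using hx)]
      simp only [List.filter_cons]
      rw [ih]

theorem removeIter : ∀ (k : ℕ) (M : List Int), M.count 0 = k →
    (fun S => match PySem.List.remove? S (0:Int) with
      | some S' => S'
      | none => S)^[k] M = M.filter (fun x => x ≠ 0) := by
  intro k
  induction k with
  | zero =>
    intro M hM
    rw [Function.iterate_zero_apply]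
    rw [List.filter_eq_self.2]
    intro a ha
    simp only [ne_eq, decide_eq_true_eq]
    rintro rfl
    rw [List.count_eq_zero] at hM
    exact hM ha
  | succ k ih =>
    intro M hM
    have hmem : (0:Int) ∈ M := by
      rw [← List.count_pos_iff]
      omega
    rw [Function.iterate_succ_apply]
    simp only [PySem.List.remove?_eq_some_erase M 0 hmem]
    rw [ih (M.erase 0) (by rw [List.count_erase_self]; omega), filter_erase_zero]

-- the removal loop computes filter (≠ 0)
theorem phase2_filter (M : List Int) :
    (PySem.List.pyRange 0 ((PySem.List.count M (0:Int) : Nat) : Int) 1).foldl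
      (fun S _ => match PySem.List.remove? S (0 : Int) with
        | some S' => S'
        | none => S) M = M.filter (fun x => x ≠ 0) := by
  rw [foldl_const_iter, PySem.List.length_pyRange_one,
    show ((((PySem.List.count M (0:Int) : Nat) : Int)) - 0).toNat = M.count 0 from by
      rw [PySem.List.count_eq]; omega]
  exact removeIter _ M rfl

theorem help_eq_filter (L : List Int) :
    reduire_help L =
      ((PySem.List.pyRange 0 ((L.length : Int) - 1) 1).foldl helpInner L).filter
        (fun x => x ≠ 0) := by
  unfold reduire_help
  exact phase2_filter _

theorem help_zero_free (L : List Int) : (0:Int) ∉ reduire_help L := by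
  rw [help_eq_filter]
  intro hmem
  simpa using (List.mem_filter.1 hmem).2

theorem phase1_bounds (L : List Int) :
    ∀ i ∈ PySem.List.pyRange 0 ((L.length : Int) - 1) 1, 0 ≤ i ∧ i + 1 < (L.length : Int) := by
  intro i hi
  rw [PySem.List.mem_pyRange_one] at hi
  omega

theorem help_inv (L : List Int) :
    SInv L ((PySem.List.pyRange 0 ((L.length : Int) - 1) 1).foldl helpInner L) :=
  phase1_fold_inv L _ (phase1_bounds L) L (SInv_refl L)

theorem help_red (L : List Int) : FreeGroup.Red (phi L) (phi (reduire_help L)) := by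
  rw [help_eq_filter]
  have h := (help_inv L).2.1
  have : phi (((PySem.List.pyRange 0 ((L.length : Int) - 1) 1).foldl helpInner L).filter
      (fun x => x ≠ 0)) = phi ((PySem.List.pyRange 0 ((L.length : Int) - 1) 1).foldl helpInner L) := by
    simp [phi, List.filter_filter]
  rw [this]
  exact h

theorem length_filter_ne_zero (M : List Int) :
    (M.filter (fun x => x ≠ 0)).length = M.length - M.count 0 := by
  induction M with
  | nil => rfl
  | cons x t ih =>
    have hcle := List.count_le_length (l := t) (a := (0:Int))
    rw [List.filter_cons, List.count_cons]
    by_cases hx : x = 0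
    · rw [if_neg (by simp [hx] : ¬ ((decide (x ≠ 0)) = true)),
        if_pos (by simp [hx] : ((x == (0:Int))) = true)]
      rw [ih, List.length_cons]
      omega
    · rw [if_pos (by simp [hx] : ((decide (x ≠ 0)) = true)),
        if_neg (by simp [hx] : ¬ ((x == (0:Int))) = true)]
      rw [List.length_cons, List.length_cons, ih]
      omega

theorem help_NF (L : List Int) (h : NF L) : reduire_help L = L := by
  rw [help_eq_filter, phase1_fix L h _ (fun i hi => (phase1_bounds L i hi).1)]
  apply List.filter_eq_self.2
  intro a ha
  simp only [ne_eq, decide_eq_true_eq]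
  rintro rfl; exact h.1 ha

theorem help_len (L : List Int) :
    (reduire_help L).length =
      L.length - ((PySem.List.pyRange 0 ((L.length : Int) - 1) 1).foldl helpInner L).count 0 := by
  rw [help_eq_filter, length_filter_ne_zero]
  rw [(help_inv L).1]

theorem help_progress (L : List Int) (h : ¬ NF L) :
    (reduire_help L).length + 1 ≤ L.length ∧
      ((0:Int) ∉ L → (reduire_help L).length + 2 ≤ L.length) := by
  unfold NF at h
  push_neg at h
  set P := (PySem.List.pyRange 0 ((L.length : Int) - 1) 1).foldl helpInner L with hP
  have hlenP : P.length = L.length := (help_inv L).1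
  have hcle : P.count 0 ≤ P.length := List.count_le_length
  by_cases hz : (0:Int) ∈ L
  · have h1 : 1 ≤ L.count 0 := List.count_pos_iff.2 hz
    have h2 := (help_inv L).2.2.1
    rw [← hP] at h2
    rw [help_len L, ← hP]
    constructor
    · omega
    · intro h0; exact absurd hz h0
  · have hch := h hz
    obtain ⟨n, hn, hnc⟩ := List.exists_not_getElem_of_not_isChain hch
    rw [not_not] at hnc
    have h2 := phase1_progress L n hn hnc
    rw [← hP] at h2
    rw [help_len L, ← hP]
    have hz0 : L.count 0 = 0 := List.count_eq_zero.2 hz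
    constructor <;> [omega; exact fun _ => by omega]

-- ==== B side ====

theorem alt_inv (L : List Int) : ∀ s : List Int, NF s →
    FreeGroup.Red (phi s ++ phi L) (phi (L.foldl altStep s)) ∧ NF (L.foldl altStep s) := by
  induction L with
  | nil =>
    intro s hs
    simp only [List.foldl_nil]
    refine ⟨?_, hs⟩
    simp only [phi, List.filter_nil, List.map_nil, List.append_nil]
    exact Relation.ReflTransGen.refl
  | cons x t ih =>
    intro s hs
    rw [List.foldl_cons]
    unfold altStep
    by_cases hx0 : x = 0
    · rw [if_pos hx0, hx0, phi_cons_zero]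
      exact ih s hs
    · rw [if_neg hx0]
      by_cases hpop : s ≠ [] ∧ PySem.List.pyGetD s (-1) 0 = -x ∧ 1 ≤ |x| ∧ |x| ≤ 4
      · rw [if_pos hpop]
        obtain ⟨hne, hlast, h1, h4⟩ := hpop
        have hlast' : s.getLast hne = -x := by
          rw [← PySem.List.pyGetD_neg_one s 0 hne]; exact hlast
        have hsplit : s.dropLast ++ [s.getLast hne] = s := List.dropLast_append_getLast hne
        have hlmem : s.getLast hne ∈ s := List.getLast_mem hne
        have hNCx : NC (s.getLast hne) x := by
          refine ⟨hlast', ?_⟩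
          rw [Int.abs_eq_natAbs] at h1 h4
          omega
        have hdlNF : NF s.dropLast := by
          refine ⟨?_, hs.2.dropLast⟩
          intro hmem
          exact hs.1 ((List.dropLast_sublist s).subset hmem)
        obtain ⟨ihr, ihn⟩ := ih s.dropLast hdlNF
        refine ⟨Relation.ReflTransGen.head ?_ ihr, ihn⟩
        have hlne : s.getLast hne ≠ 0 := fun h0 => hs.1 (h0 ▸ hlmem)
        have e1 : phi s = phi s.dropLast ++ [ffg (s.getLast hne)] := by
          conv_lhs => rw [← hsplit]
          rw [phi_append, phi_cons_ne _ _ hlne]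
          rfl
        rw [e1, phi_cons_ne _ _ hx0, List.append_assoc, List.singleton_append,
          NC_ffg (s.getLast hne) x hNCx]
        exact FreeGroup.Red.Step.not
      · rw [if_neg hpop]
        have hNFsx : NF (s ++ [x]) := by
          refine ⟨?_, ?_⟩
          · intro hmem
            rcases List.mem_append.1 hmem with hm | hm
            · exact hs.1 hm
            · rw [List.mem_singleton] at hm
              exact hx0 hm.symm
          · refine hs.2.append (List.isChain_singleton x) ?_
            intro a ha y hy
            simp only [List.head?_cons, Option.mem_def, Option.some.injEq] at hy
            subst hy
            intro hNCax
            apply hpop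
            have hne : s ≠ [] := by
              intro h0
              subst h0
              simp at ha
            have hga : s.getLast? = some a := ha
            have ha' : a = s.getLast hne := by
              rw [List.getLast?_eq_some_getLast hne] at hga
              exact (Option.some.inj hga).symm
            refine ⟨hne, ?_, ?_, ?_⟩
            · rw [PySem.List.pyGetD_neg_one s 0 hne, ← ha']
              exact hNCax.1
            · rw [Int.abs_eq_natAbs]
              have := hNCax.2.1
              omega
            · rw [Int.abs_eq_natAbs]
              have := hNCax.2.2
              omega
        obtain ⟨ihr, ihn⟩ := ih (s ++ [x]) hNFsx
        refine ⟨?_, ihn⟩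
        rw [phi_cons_ne _ _ hx0]
        have e2 : phi (s ++ [x]) = phi s ++ [ffg x] := by
          rw [phi_append, phi_cons_ne _ _ hx0]
          rfl
        rw [show phi s ++ ffg x :: phi t = (phi s ++ [ffg x]) ++ phi t by simp, ← e2]
        exact ihr

theorem alt_spec (L : List Int) :
    FreeGroup.Red (phi L) (phi (reduire_alt L)) ∧ NF (reduire_alt L) := by
  have h := alt_inv L [] ⟨by simp, List.isChain_nil⟩
  simpa [phi, reduire_alt] using h

-- ==== uniqueness of normal forms ====

theorem normal_unique (L W₁ W₂ : List Int)
    (h1 : FreeGroup.Red (phi L) (phi W₁)) (n1 : NF W₁)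
    (h2 : FreeGroup.Red (phi L) (phi W₂)) (n2 : NF W₂) : W₁ = W₂ := by
  have e1 : phi W₁ = W₁.map ffg := phi_zero_free _ n1.1
  have e2 : phi W₂ = W₂.map ffg := phi_zero_free _ n2.1
  have r1 : FreeGroup.reduce (phi L) = phi W₁ := by
    rw [FreeGroup.reduce.eq_of_red h1, e1]
    exact (NF_isReduced W₁ n1).reduce_eq
  have r2 : FreeGroup.reduce (phi L) = phi W₂ := by
    rw [FreeGroup.reduce.eq_of_red h2, e2]
    exact (NF_isReduced W₂ n2).reduce_eq
  have : W₁.map ffg = W₂.map ffg := by rw [← e1, ← e2, ← r1, ← r2]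
  exact List.map_injective_iff.2 (fun a b => ffg_inj a b) this

-- ==== the while loop ====

theorem loop_fix (L : List Int) (h : NF L) : ∀ (m : ℕ) (n k : Int),
    (n - 2 * k).toNat = m → reduireLoop n k L = L := by
  intro m
  induction m using Nat.strong_induction_on with
  | _ m ih =>
    intro n k hm
    rw [reduireLoop]
    split_ifs with hlt
    · rw [help_NF L h]
      exact ih (n - 2 * (k+1)).toNat (by omega) n (k+1) rfl
    · rfl

theorem loop_norm : ∀ (m : ℕ) (n k : Int) (L : List Int), (n - 2 * k).toNat = m →
    (0:Int) ∉ L → (L.length : Int) ≤ n - 2 * k + 1 →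
    NF (reduireLoop n k L) ∧ FreeGroup.Red (phi L) (phi (reduireLoop n k L)) := by
  intro m
  induction m using Nat.strong_induction_on with
  | _ m ih =>
    intro n k L hm h0 hlen
    rw [reduireLoop]
    split_ifs with hlt
    · by_cases hNF : NF L
      · rw [help_NF L hNF, loop_fix L hNF (n - 2 * (k+1)).toNat n (k+1) rfl]
        exact ⟨hNF, Relation.ReflTransGen.refl⟩
      · have hp := (help_progress L hNF).2 h0
        have h0' := help_zero_free L
        have ihr := ih (n - 2 * (k+1)).toNat (by omega) n (k+1) (reduire_help L) rfl h0'
          (by push_cast; omega)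
        exact ⟨ihr.1, Relation.ReflTransGen.trans (help_red L) ihr.2⟩
    · refine ⟨⟨h0, ?_⟩, Relation.ReflTransGen.refl⟩
      match L, hlen with
      | [], _ => exact List.isChain_nil
      | [x], _ => exact List.isChain_singleton x
      | (x :: y :: t), hlen => simp at hlen; omega

theorem reduire_norm (L : List Int) :
    NF (reduire L) ∧ FreeGroup.Red (phi L) (phi (reduire L)) := by
  unfold reduire
  by_cases hn : (L.length : Int) ≤ 0
  · have : L = [] := by
      cases L with
      | nil => rfl
      | cons x t => exfalso; simp only [List.length_cons] at hn; omega
    subst this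
    rw [reduireLoop]
    norm_num
    exact ⟨⟨by simp, List.isChain_nil⟩, Relation.ReflTransGen.refl⟩
  · rw [reduireLoop]
    rw [if_pos (by omega)]
    by_cases hNF : NF L
    · rw [help_NF L hNF, loop_fix L hNF _ _ _ rfl]
      exact ⟨hNF, Relation.ReflTransGen.refl⟩
    · have hp := (help_progress L hNF).1
      have ihr := loop_norm (((L.length : Int) - 2 * 1).toNat) (L.length : Int) 1
        (reduire_help L) rfl (help_zero_free L) (by push_cast; omega)
      exact ⟨ihr.1, Relation.ReflTransGen.trans (help_red L) ihr.2⟩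

-- ===== VERDICT (by name: the statement is the Claim_ definition above) =====
theorem reduire_spec : Claim_equal_reduire := by
  intro L _
  unfold Spec_reduire
  have hA := reduire_norm L
  have hB := alt_spec L
  exact normal_unique L (reduire L) (reduire_alt L) hA.2 hA.1 hB.1 hB.2
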